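-- pv_equiv track=rewrite | github.com/TaeTanakrit0089/Prepro65-Code | 61.CarPark.py | calculate
-- ===== SOURCE A (Python) =====
-- def calculate(bo1):
--     """Thunderbolts and lightning, very, very frightening me"""
--     summer = 0
--     #Less than 2 hours
--     if bo1 <= 2:
--         summer = 0
--     else:
--         #morethan 1 day (24hours)
--         if bo1 > 24:
--             summer += ((bo1 // 24) * 200)
--             summer += calculate(bo1 % 24)
--         #1 day
--         elif bo1 == 24:
--             summer += 200
--         #less than 1 day
--         elif bo1 <= 24:
--             if bo1 <= 12:
--                 summer += 15*bo1
--             else: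
--                 summer += 200
--
--     # 1st week discount
--     if bo1 >= 168:
--         summer -= (bo1//168)*300
--     # 4th week discount
--     if bo1 >= 672:
--         summer -= 500
--     return summer
-- ===== SOURCE B (Python) =====
-- def calculate(bo1):
--     """Non-recursive: base fee from divmod(bo1, 24), then weekly discounts."""
--     if bo1 <= 2:
--         return 0
--     days, rest = divmod(bo1, 24)
--     if rest <= 2:
--         part = 0
--     elif rest <= 12:
--         part = 15 * rest
--     else:
--         part = 200
--     total = days * 200 + part
--     if bo1 >= 168:
--         total -= (bo1 // 168) * 300
--     if bo1 >= 672: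
--         total -= 500
--     return total
-- ===== Notes on version B (the rewrite author's own statement) =====
-- stated objective: simpler
-- what changed: Replaced A's self-recursion and nested branch ladder by one flat divmod-based computation of the base fee, then the same weekly discounts.
import Mathlib
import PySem

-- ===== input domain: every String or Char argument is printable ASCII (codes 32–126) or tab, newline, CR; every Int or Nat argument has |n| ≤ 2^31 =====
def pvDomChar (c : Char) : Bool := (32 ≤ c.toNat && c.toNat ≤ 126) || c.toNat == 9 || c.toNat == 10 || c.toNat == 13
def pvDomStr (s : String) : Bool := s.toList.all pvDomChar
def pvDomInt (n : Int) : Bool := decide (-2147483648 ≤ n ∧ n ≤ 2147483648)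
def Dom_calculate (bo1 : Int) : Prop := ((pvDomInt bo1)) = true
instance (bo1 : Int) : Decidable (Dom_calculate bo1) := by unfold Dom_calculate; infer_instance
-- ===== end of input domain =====

-- B replaces A's self-recursion and nested branches by one direct divmod-based computation (objective: simpler).

-- ===== PORT A =====
def calculate (bo1 : Int) : Int :=
  let summer : Int := 0
  let summer : Int :=
    if bo1 ≤ 2 then 0
    else if bo1 > 24 then
      summer + (PySem.Int.floordiv bo1 24) * 200 + calculate (PySem.Int.mod bo1 24)
    else if bo1 = 24 then summer + 200
    else if bo1 ≤ 24 then
      (if bo1 ≤ 12 then summer + 15 * bo1 else summer + 200)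
    else summer
  let summer : Int := if bo1 ≥ 168 then summer - (PySem.Int.floordiv bo1 168) * 300 else summer
  if bo1 ≥ 672 then summer - 500 else summer
termination_by bo1.toNat
decreasing_by
  have h1 : PySem.Int.mod bo1 24 = bo1 % 24 := PySem.Int.mod_eq_emod_of_pos (by omega)
  have h2' : 0 ≤ bo1 % 24 ∧ bo1 % 24 < 24 := ⟨Int.emod_nonneg _ (by omega), Int.emod_lt_of_pos _ (by omega)⟩
  omega

-- ===== PORT B =====
def feeB (r : Int) : Int :=
  if r ≤ 2 then 0 else if r ≤ 12 then 15 * r else 200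

def calculate_alt (bo1 : Int) : Int :=
  if bo1 ≤ 2 then 0
  else
    let days := PySem.Int.floordiv bo1 24
    let rest := PySem.Int.mod bo1 24
    let total := days * 200 + feeB rest
    let total := if bo1 ≥ 168 then total - (PySem.Int.floordiv bo1 168) * 300 else total
    if bo1 ≥ 672 then total - 500 else total

-- ===== PRECONDITION & SPEC =====
def Spec_calculate (bo1 : Int) (out : Int) : Prop := out = calculate_alt bo1
instance (bo1 : Int) (out : Int) : Decidable (Spec_calculate bo1 out) := by unfold Spec_calculate; infer_instance

-- ===== CLAIM (what is proved, stated in full; the proofs are below) =====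
def Claim_equal_calculate : Prop := ∀ (bo1 : Int), Dom_calculate bo1 → Spec_calculate bo1 (calculate bo1)

-- ===== LEMMAS AND PROOFS =====

-- A's one-level recursive call receives bo1 % 24 ∈ [0, 24); on that range A computes feeB.
theorem calculate_small (r : Int) (h0 : 0 ≤ r) (h24 : r < 24) : calculate r = feeB r := by
  rw [calculate, feeB]
  have : ¬ r ≥ 168 := by omega
  have : ¬ r ≥ 672 := by omega
  split_ifs <;> omega

theorem calculate_eq_alt (bo1 : Int) : calculate bo1 = calculate_alt bo1 := by
  rw [calculate, calculate_alt]
  by_cases hle : bo1 ≤ 2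
  · simp only [hle, if_pos]
    have h1 : ¬ bo1 ≥ 168 := by omega
    have h2 : ¬ bo1 ≥ 672 := by omega
    simp [h1, h2]
  · have hpos : (0:Int) < 24 := by omega
    have hmod : PySem.Int.mod bo1 24 = bo1 % 24 := PySem.Int.mod_eq_emod_of_pos hpos
    have hdiv : PySem.Int.floordiv bo1 24 = bo1 / 24 := PySem.Int.floordiv_eq_ediv_of_pos hpos
    have h0 : 0 ≤ bo1 % 24 := Int.emod_nonneg _ (by omega)
    have h24 : bo1 % 24 < 24 := Int.emod_lt_of_pos _ (by omega)
    have hrec : calculate (PySem.Int.mod bo1 24) = feeB (bo1 % 24) := by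
      rw [hmod]; exact calculate_small _ h0 h24
    by_cases hgt : bo1 > 24
    · rw [hmod] at hrec
      simp only [hle, if_neg, hgt, if_pos, not_false_iff, hmod, hrec]
      split_ifs <;> ring
    · -- 2 < bo1 ≤ 24: A's direct branches equal days*200 + feeB rest
      by_cases h24' : bo1 = 24
      · subst h24'
        simp only [hle, if_neg, hgt, if_true, not_false_iff]
        norm_num [feeB, hmod, hdiv]
      · have hlt : bo1 < 24 := by omega
        have hdiv0 : bo1 / 24 = 0 := by omega
        have hmod0 : bo1 % 24 = bo1 := by omega
        simp only [hle, hgt, h24', if_neg, not_false_iff, hmod, hdiv, hdiv0, hmod0, feeB]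
        split_ifs <;> omega

-- ===== VERDICT (by name: the statement is the Claim_ definition above) =====
theorem calculate_spec : Claim_equal_calculate := by
  intro bo1 _
  unfold Spec_calculate
  exact calculate_eq_alt bo1
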